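-- pv_equiv track=rewrite | github.com/devuming/al_python | 모의고사.py | solution
-- ===== SOURCE A (Python) =====
-- def solution(answers):      # 정답 배열
--     answer = []
--     ans_a = [1, 2, 3, 4, 5]
--     ans_b = [2, 1, 2, 3, 2, 4, 2, 5]
--     ans_c = [3, 3, 1, 1, 2, 2, 4, 4, 5, 5]
--
--     cnt = [0, 0, 0]
--
--     for i, ans in enumerate(answers):
--         if ans == ans_a[i % len(ans_a)]:
--             cnt[0] += 1
--         if ans == ans_b[i % len(ans_b)]:
--             cnt[1] += 1
--         if ans == ans_c[i % len(ans_c)]: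
--             cnt[2] += 1
--
--     for i, c in enumerate(cnt):
--         if c == max(cnt):
--             answer.append(i + 1)
--
--     return answer       # 가장 많은 문제를 맞춘 사람
-- ===== SOURCE B (Python) =====
-- def solution(answers):
--     # The three pattern streams are all periodic with period lcm(5,8,10)=40, so the
--     # pattern value at index i depends only on i % 40. Build a histogram of
--     # (i % 40, answer) occurrences once, then read each person's score off the
--     # table by summing the 40 slots of one period.
--     patterns = [[1, 2, 3, 4, 5],
--                 [2, 1, 2, 3, 2, 4, 2, 5],
--                 [3, 3, 1, 1, 2, 2, 4, 4, 5, 5]]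
--     hist = {}
--     for i, a in enumerate(answers):
--         key = (i % 40, a)
--         hist[key] = hist.get(key, 0) + 1
--     cnt = [sum(hist.get((j, pat[j % len(pat)]), 0) for j in range(40))
--            for pat in patterns]
--     best = max(cnt)
--     return [k + 1 for k, c in enumerate(cnt) if c == best]
-- ===== Notes on version B (the rewrite author's own statement) =====
-- stated objective: alternative
-- what changed: A compares every answer against all three cyclic patterns in one pass; B exploits that the three streams share period lcm(5,8,10)=40, builds a histogram dict keyed by (index mod 40, answer) in a first stage, and in a second stage reads each score off the table by summing the 40 slots of one period, with no per-answer pattern comparison.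
import Mathlib
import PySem

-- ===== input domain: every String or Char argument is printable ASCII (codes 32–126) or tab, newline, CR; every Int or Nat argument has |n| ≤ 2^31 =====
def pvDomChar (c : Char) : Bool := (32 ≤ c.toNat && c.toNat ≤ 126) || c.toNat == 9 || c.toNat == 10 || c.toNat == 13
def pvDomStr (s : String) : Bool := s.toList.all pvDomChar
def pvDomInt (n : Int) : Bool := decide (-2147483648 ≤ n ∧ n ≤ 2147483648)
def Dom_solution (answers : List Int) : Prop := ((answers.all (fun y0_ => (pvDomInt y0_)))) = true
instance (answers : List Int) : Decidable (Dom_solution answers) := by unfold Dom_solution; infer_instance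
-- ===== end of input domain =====

-- B replaces A's answer-major compare-against-all-three-patterns pass by a two-stage
-- periodicity algorithm: a histogram keyed by (index mod 40, answer), then table sums
-- over one shared period of length lcm(5,8,10)=40 (objective: alternative).

-- ===== PORT A =====
-- One pass over enumerate(answers) updating the triple counter (cnt[0], cnt[1], cnt[2]);
-- the index i % len(pattern) is always in range, so pyGetD's default 0 is unreachable.
def solution (answers : List Int) : List Int :=
  let ansA : List Int := [1, 2, 3, 4, 5]
  let ansB : List Int := [2, 1, 2, 3, 2, 4, 2, 5]
  let ansC : List Int := [3, 3, 1, 1, 2, 2, 4, 4, 5, 5]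
  let cnt : Int × Int × Int :=
    (PySem.List.enumerate answers 0).foldl
      (fun c p =>
        let c := if p.2 = PySem.List.pyGetD ansA (PySem.Int.mod p.1 (ansA.length : Int)) 0
                 then (c.1 + 1, c.2.1, c.2.2) else c
        let c := if p.2 = PySem.List.pyGetD ansB (PySem.Int.mod p.1 (ansB.length : Int)) 0
                 then (c.1, c.2.1 + 1, c.2.2) else c
        if p.2 = PySem.List.pyGetD ansC (PySem.Int.mod p.1 (ansC.length : Int)) 0
        then (c.1, c.2.1, c.2.2 + 1) else c)
      (0, 0, 0)
  let cntL : List Int := [cnt.1, cnt.2.1, cnt.2.2]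
  let m : Int := (PySem.List.max? cntL (fun x => x)).getD 0
  (PySem.List.enumerate cntL 0).foldl
    (fun answer p => if p.2 = m then answer ++ [p.1 + 1] else answer) []

-- ===== PORT B =====
-- Stage 1: histogram dict keyed by (i % 40, answer) built with d[k] = d.get(k, 0) + 1.
-- Stage 2: each pattern's score is the sum of the 40 table slots of one period.
def solution_alt (answers : List Int) : List Int :=
  let patterns : List (List Int) :=
    [[1, 2, 3, 4, 5], [2, 1, 2, 3, 2, 4, 2, 5], [3, 3, 1, 1, 2, 2, 4, 4, 5, 5]]
  let hist : PySem.Dict (Int × Int) Int :=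
    (PySem.List.enumerate answers 0).foldl
      (fun d p =>
        let key : Int × Int := (PySem.Int.mod p.1 40, p.2)
        d.insert key (d.getD key 0 + 1))
      PySem.Dict.empty
  let cnt : List Int := patterns.map (fun pat =>
    ((PySem.List.pyRange 0 40 1).map (fun j =>
      hist.getD (j, PySem.List.pyGetD pat (PySem.Int.mod j (pat.length : Int)) 0) 0)).sum)
  let best : Int := (PySem.List.max? cnt (fun x => x)).getD 0
  ((PySem.List.enumerate cnt 0).filter (fun p => p.2 == best)).map (fun p => p.1 + 1)

-- ===== PRECONDITION & SPEC =====
def Spec_solution (answers : List Int) (out : List Int) : Prop := out = solution_alt answers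
instance (answers : List Int) (out : List Int) : Decidable (Spec_solution answers out) := by unfold Spec_solution; infer_instance

-- ===== CLAIM (what is proved, stated in full; the proofs are below) =====
def Claim_equal_solution : Prop := ∀ (answers : List Int), Dom_solution answers → Spec_solution answers (solution answers)

-- ===== LEMMAS AND PROOFS =====

-- A's triple-counter fold computes, componentwise, three independent countP passes.
theorem pv_fold_eq_counts (pA pB pC : List Int) (nA nB nC : Int) (l : List Int) :
    ∀ (s : Int) (c : Int × Int × Int),
    (PySem.List.enumerate l s).foldl
      (fun c p =>
        let c := if p.2 = PySem.List.pyGetD pA (PySem.Int.mod p.1 nA) 0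
                 then (c.1 + 1, c.2.1, c.2.2) else c
        let c := if p.2 = PySem.List.pyGetD pB (PySem.Int.mod p.1 nB) 0
                 then (c.1, c.2.1 + 1, c.2.2) else c
        if p.2 = PySem.List.pyGetD pC (PySem.Int.mod p.1 nC) 0
        then (c.1, c.2.1, c.2.2 + 1) else c)
      c
    = (c.1 + ((PySem.List.enumerate l s).countP
          (fun p => p.2 == PySem.List.pyGetD pA (PySem.Int.mod p.1 nA) 0) : Int),
       c.2.1 + ((PySem.List.enumerate l s).countP
          (fun p => p.2 == PySem.List.pyGetD pB (PySem.Int.mod p.1 nB) 0) : Int),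
       c.2.2 + ((PySem.List.enumerate l s).countP
          (fun p => p.2 == PySem.List.pyGetD pC (PySem.Int.mod p.1 nC) 0) : Int)) := by
  induction l with
  | nil => intro s c; simp [PySem.List.enumerate_nil]
  | cons x t ih =>
    intro s c
    rw [PySem.List.enumerate_cons]
    simp only [List.foldl_cons, List.countP_cons, ih]
    simp only [beq_iff_eq]
    split_ifs <;> simp [Prod.ext_iff] <;> omega

-- Summing an indicator over pyRange 0 40 1 at a single in-range slot.
theorem pv_sum_indicator (v : Int → Int) (c w : Int) (hc0 : 0 ≤ c) (hc40 : c < 40) :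
    ((PySem.List.pyRange 0 40 1).map
      (fun j => if ((j, v j) : Int × Int) = (c, w) then (1 : Int) else 0)).sum
    = if w = v c then 1 else 0 := by
  by_cases h : w = v c
  · subst h
    have hpt : ∀ j : Int, (if ((j, v j) : Int × Int) = (c, v c) then (1 : Int) else 0)
        = if (j == c) = true then (1 : Int) else 0 := by
      intro j
      by_cases hj : j = c <;> simp [hj, Prod.ext_iff]
    rw [List.map_congr_left (fun j _ => hpt j), PySem.List.sum_map_ite_one_zero]
    have hcnt : List.countP (fun j => j == c) (PySem.List.pyRange 0 40 1)
        = List.count c (PySem.List.pyRange 0 40 1) := rfl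
    rw [hcnt, List.count_eq_one_of_mem (PySem.List.nodup_pyRange_one 0 40)
      (PySem.List.mem_pyRange_one.mpr ⟨hc0, hc40⟩)]
    simp
  · rw [if_neg h]
    apply List.sum_eq_zero
    intro x hx
    rcases List.mem_map.mp hx with ⟨j, _, hj⟩
    rw [← hj]
    rw [if_neg]
    intro he
    have h1 : j = c := congrArg Prod.fst he
    have h2 : v j = w := congrArg Prod.snd he
    subst h1
    exact h h2.symm

-- Summing per-slot multiplicities over one period equals a direct countP,
-- for a list of pairs whose first components all lie in [0, 40).
theorem pv_sum_count (v : Int → Int) (L : List (Int × Int))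
    (hL : ∀ k ∈ L, 0 ≤ k.1 ∧ k.1 < 40) :
    ((PySem.List.pyRange 0 40 1).map
      (fun j => (List.count ((j, v j) : Int × Int) L : Int))).sum
    = (L.countP (fun k => k.2 == v k.1) : Int) := by
  induction L with
  | nil => simp
  | cons k t ih =>
    have hk := hL k (by simp)
    have ht : ∀ k ∈ t, 0 ≤ k.1 ∧ k.1 < 40 := fun k hk => hL k (by simp [hk])
    have hpt : ∀ j : Int, (List.count ((j, v j) : Int × Int) (k :: t) : Int)
        = (List.count ((j, v j) : Int × Int) t : Int)
          + (if ((j, v j) : Int × Int) = (k.1, k.2) then (1 : Int) else 0) := by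
      intro j
      rw [List.count_cons]
      push_cast
      congr 1
      rcases eq_or_ne ((j, v j) : Int × Int) k with h | h
      · simp [h]
      · rw [if_neg (fun hk => h (beq_iff_eq.mp hk).symm), if_neg (fun hk => h (by simpa using hk))]
    rw [List.map_congr_left (fun j _ => hpt j), PySem.List.sum_map_add_int, ih ht,
        pv_sum_indicator v k.1 k.2 hk.1 hk.2, List.countP_cons]
    by_cases h : k.2 = v k.1 <;> simp [h]

-- Stage-2 table sum over the histogram equals the direct countP over the answers.
theorem pv_hist_sum_eq_countP (v : Int → Int) (l : List Int) :
    ∀ s : Int, 0 ≤ s →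
    ((PySem.List.pyRange 0 40 1).map (fun j =>
      (((PySem.List.enumerate l s).foldl
        (fun d p =>
          let key : Int × Int := (PySem.Int.mod p.1 40, p.2)
          d.insert key (d.getD key 0 + 1))
        PySem.Dict.empty).getD (j, v j) 0))).sum
    = ((PySem.List.enumerate l s).countP
        (fun p => p.2 == v (PySem.Int.mod p.1 40)) : Int) := by
  intro s _
  have hfold : (PySem.List.enumerate l s).foldl
        (fun d p =>
          let key : Int × Int := (PySem.Int.mod p.1 40, p.2)
          d.insert key (d.getD key 0 + 1))
        PySem.Dict.empty
      = PySem.Dict.counter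
          ((PySem.List.enumerate l s).map (fun p => (PySem.Int.mod p.1 40, p.2))) := by
    rw [← PySem.Dict.foldl_insert_getD_add_one_eq_counter, List.foldl_map]
  rw [hfold]
  simp only [PySem.Dict.getD_counter]
  rw [pv_sum_count v _ (by
    intro k hk
    rcases List.mem_map.mp hk with ⟨p, _, hp⟩
    rw [← hp]
    exact ⟨PySem.Int.mod_nonneg p.1 (by omega), PySem.Int.mod_lt p.1 (by omega)⟩)]
  rw [List.countP_map]
  rfl

-- Reducing mod 40 first does not change mod n, for n dividing 40.
theorem pv_mod_mod (i n : Int) (hn : 0 < n) (hd : n ∣ 40) :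
    PySem.Int.mod (PySem.Int.mod i 40) n = PySem.Int.mod i n := by
  rw [PySem.Int.mod_eq_emod_of_pos (show (0:Int) < 40 by omega),
      PySem.Int.mod_eq_emod_of_pos hn, PySem.Int.mod_eq_emod_of_pos hn,
      Int.emod_emod_of_dvd _ hd]

-- ===== VERDICT (by name: the statement is the Claim_ definition above) =====
theorem solution_spec : Claim_equal_solution := by
  intro answers _
  show solution answers = solution_alt answers
  unfold solution solution_alt
  simp only [List.map_cons, List.map_nil, List.length_cons, List.length_nil, Nat.cast_ofNat,
    zero_add, Nat.reduceAdd]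
  rw [pv_fold_eq_counts [1,2,3,4,5] [2,1,2,3,2,4,2,5] [3,3,1,1,2,2,4,4,5,5] 5 8 10 answers 0 (0,0,0)]
  rw [pv_hist_sum_eq_countP (fun r => PySem.List.pyGetD [1,2,3,4,5] (PySem.Int.mod r 5) 0) answers 0 le_rfl,
      pv_hist_sum_eq_countP (fun r => PySem.List.pyGetD [2,1,2,3,2,4,2,5] (PySem.Int.mod r 8) 0) answers 0 le_rfl,
      pv_hist_sum_eq_countP (fun r => PySem.List.pyGetD [3,3,1,1,2,2,4,4,5,5] (PySem.Int.mod r 10) 0) answers 0 le_rfl]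
  have hm : ∀ (n : Int), 0 < n → n ∣ 40 →
      ∀ p : Int × Int, PySem.Int.mod (PySem.Int.mod p.1 40) n = PySem.Int.mod p.1 n :=
    fun n hn hd p => pv_mod_mod p.1 n hn hd
  simp only [hm 5 (by omega) (by decide), hm 8 (by omega) (by decide),
    hm 10 (by omega) (by decide)]
  set c0 : Int := ((PySem.List.enumerate answers 0).countP
      (fun p => p.2 == PySem.List.pyGetD [1,2,3,4,5] (PySem.Int.mod p.1 5) 0) : Int) with hc0
  set c1 : Int := ((PySem.List.enumerate answers 0).countP
      (fun p => p.2 == PySem.List.pyGetD [2,1,2,3,2,4,2,5] (PySem.Int.mod p.1 8) 0) : Int) with hc1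
  set c2 : Int := ((PySem.List.enumerate answers 0).countP
      (fun p => p.2 == PySem.List.pyGetD [3,3,1,1,2,2,4,4,5,5] (PySem.Int.mod p.1 10) 0) : Int) with hc2
  clear hc0 hc1 hc2
  clear_value c0 c1 c2
  simp only [PySem.List.enumerate_cons, PySem.List.enumerate_nil, List.foldl_cons, List.foldl_nil,
    zero_add, PySem.List.max?_id_cons, Option.getD_some]
  generalize hM : max (max c0 c1) c2 = m
  have hone : c0 = m ∨ c1 = m ∨ c2 = m := by
    rcases max_choice (max c0 c1) c2 with h | h
    · rcases max_choice c0 c1 with h' | h' <;> omega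
    · omega
  by_cases h0 : c0 = m <;> by_cases h1 : c1 = m <;> by_cases h2 : c2 = m <;>
    simp [h0, h1, h2, List.filter_nil]
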